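-- pv_equiv track=rewrite | github.com/pypi-data/pypi-mirror-402 | packages/scrappy-ai/scrappy_ai-1.2.0-py3-none-any.whl/scrappy/platform/translation.py | _split_command_preserving_quotes
-- ===== SOURCE A (Python) =====
-- def _split_command_preserving_quotes(command: str) -> list[str]:
--     """
--     Split command into parts while preserving quotes.
--
--     Args:
--         command: Command string to split
--
--     Returns:
--         List of command parts
--     """
--     parts = []
--     current = ""
--     in_quote = False
--     quote_char = None
--
--     for char in command:
--         if char in ('"', "'") and not in_quote:
--             in_quote = True
--             quote_char = char
--             current += char
--         elif char == quote_char and in_quote: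
--             in_quote = False
--             quote_char = None
--             current += char
--         elif char == ' ' and not in_quote:
--             if current:
--                 parts.append(current)
--                 current = ""
--         else:
--             current += char
--
--     if current:
--         parts.append(current)
--
--     return parts
-- ===== SOURCE B (Python) =====
-- def _split_command_preserving_quotes(command: str) -> list[str]:
--     """Index-based scanner: quoted spans are consumed eagerly by an inner loop."""
--     parts = []
--     cur = ""
--     i = 0
--     n = len(command)
--     while i < n:
--         c = command[i]
--         if c in ('"', "'"):
--             cur += c
--             i += 1
--             while i < n and command[i] != c:
--                 cur += command[i]
--                 i += 1
--             if i < n:  # closing quote found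
--                 cur += c
--                 i += 1
--         elif c == ' ':
--             if cur:
--                 parts.append(cur)
--                 cur = ""
--             i += 1
--         else:
--             cur += c
--             i += 1
--     if cur:
--         parts.append(cur)
--     return parts
-- ===== Notes on version B (the rewrite author's own statement) =====
-- stated objective: alternative
-- what changed: Replaced the single-pass state machine with in_quote/quote_char flags by an index-based scanner whose inner loop eagerly consumes each quoted span up to the matching quote.
import Mathlib
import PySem

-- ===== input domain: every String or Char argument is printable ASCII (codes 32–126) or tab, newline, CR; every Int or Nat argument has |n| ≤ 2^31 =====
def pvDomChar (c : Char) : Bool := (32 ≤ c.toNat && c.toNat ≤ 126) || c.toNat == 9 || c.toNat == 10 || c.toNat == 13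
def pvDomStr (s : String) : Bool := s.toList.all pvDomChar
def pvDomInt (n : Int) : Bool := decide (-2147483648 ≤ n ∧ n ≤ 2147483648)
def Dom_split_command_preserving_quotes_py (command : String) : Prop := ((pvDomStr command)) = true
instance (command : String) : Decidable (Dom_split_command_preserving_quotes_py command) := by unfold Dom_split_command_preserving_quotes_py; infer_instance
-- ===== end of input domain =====

-- B replaces A's in_quote/quote_char state flags by an index scanner that consumes each
-- quoted span eagerly with an inner loop (objective: alternative decomposition, same cost).
-- Strings are ported as List Char (PySem.Chars convention); tokens are rebuilt with String.mk.

-- ===== PORT A =====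
-- state: (parts, current, quote_char); in_quote ⟺ quote_char ≠ none (Python keeps them in lockstep)
def splitA_step (st : List (List Char) × List Char × Option Char) (c : Char) :
    List (List Char) × List Char × Option Char :=
  let (parts, current, quote) := st
  if (c = '"' ∨ c = '\'') ∧ quote = none then (parts, current ++ [c], some c)
  else if some c = quote then (parts, current ++ [c], none)
  else if c = ' ' ∧ quote = none then
    (if current ≠ [] then (parts ++ [current], [], none) else (parts, [], none))
  else (parts, current ++ [c], quote)

def split_command_preserving_quotes_py (command : String) : List String :=
  let st := command.toList.foldl splitA_step ([], [], none)
  ((st.1 ++ (if st.2.1 ≠ [] then [st.2.1] else []))).map String.mk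

-- ===== PORT B =====
-- inner loop: consume chars until the matching quote q (included) or end of string
def splitB_consume (q : Char) : List Char → List Char × List Char
  | [] => ([], [])
  | c :: rest =>
    if c = q then ([c], rest)
    else
      let (s, r) := splitB_consume q rest
      (c :: s, r)

lemma splitB_consume_len (q : Char) (l : List Char) :
    (splitB_consume q l).1.length + (splitB_consume q l).2.length = l.length := by
  induction l with
  | nil => simp [splitB_consume]
  | cons c rest ih =>
    simp only [splitB_consume]
    split
    · simp
      omega
    · simp only [List.length_cons]
      omega

def splitB_go : List Char → List Char → List (List Char) → List (List Char)
  | [], cur, parts => parts ++ (if cur ≠ [] then [cur] else [])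
  | c :: rest, cur, parts =>
    if c = '"' ∨ c = '\'' then
      splitB_go (splitB_consume c rest).2 (cur ++ [c] ++ (splitB_consume c rest).1) parts
    else if c = ' ' then
      splitB_go rest [] (if cur ≠ [] then parts ++ [cur] else parts)
    else
      splitB_go rest (cur ++ [c]) parts
termination_by l => l.length
decreasing_by
  · have := splitB_consume_len c rest
    simp
    omega
  · simp
  · simp

def split_command_preserving_quotes_py_alt (command : String) : List String :=
  (splitB_go command.toList [] []).map String.mk

-- ===== PRECONDITION & SPEC =====
def Spec_split_command_preserving_quotes_py (command : String) (out : List String) : Prop := out = split_command_preserving_quotes_py_alt command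
instance (command : String) (out : List String) : Decidable (Spec_split_command_preserving_quotes_py command out) := by unfold Spec_split_command_preserving_quotes_py; infer_instance

-- ===== CLAIM (what is proved, stated in full; the proofs are below) =====
def Claim_equal_split_command_preserving_quotes_py : Prop := ∀ (command : String), Dom_split_command_preserving_quotes_py command → Spec_split_command_preserving_quotes_py command (split_command_preserving_quotes_py command)

-- ===== LEMMAS AND PROOFS =====

-- finalisation of A's fold from an arbitrary state
def splitA_out (parts : List (List Char)) (cur : List Char) (q : Option Char)
    (l : List Char) : List (List Char) :=
  let st := l.foldl splitA_step (parts, cur, q)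
  st.1 ++ (if st.2.1 ≠ [] then [st.2.1] else [])

-- inside a quoted span, A's fold does exactly what splitB_consume computes
lemma splitA_quoted (q : Char) (l : List Char) (parts : List (List Char)) (cur : List Char) :
    splitA_out parts cur (some q) l
      = splitA_out parts (cur ++ (splitB_consume q l).1) none (splitB_consume q l).2 := by
  induction l generalizing cur with
  | nil => simp [splitB_consume, splitA_out]
  | cons c rest ih =>
    by_cases hc : c = q
    · subst hc
      simp [splitA_out, splitB_consume, List.foldl_cons, splitA_step]
    · have hstep : splitA_step (parts, cur, some q) c = (parts, cur ++ [c], some q) := by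
        simp [splitA_step, hc]
      simp only [splitB_consume, if_neg hc]
      have := ih (cur ++ [c])
      simpa [splitA_out, List.foldl_cons, hstep, List.append_assoc] using this
    
-- main invariant: from an unquoted state, A's fold equals B's scanner
lemma splitA_eq_splitB (n : ℕ) : ∀ (l : List Char), l.length ≤ n →
    ∀ (cur : List Char) (parts : List (List Char)),
      splitA_out parts cur none l = splitB_go l cur parts := by
  induction n with
  | zero =>
    intro l hl cur parts
    have : l = [] := by cases l <;> simp_all
    subst this
    simp [splitA_out, splitB_go]
  | succ n ih =>
    intro l hl cur parts
    cases l with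
    | nil => simp [splitA_out, splitB_go]
    | cons c rest =>
      by_cases hq : c = '"' ∨ c = '\''
      · have hstep : splitA_step (parts, cur, none) c = (parts, cur ++ [c], some c) := by
          simp only [splitA_step]
          rw [if_pos ⟨hq, trivial⟩]
        have hlen := splitB_consume_len c rest
        have hrest : (splitB_consume c rest).2.length ≤ n := by
          simp at hl; omega
        calc splitA_out parts cur none (c :: rest)
            = splitA_out parts (cur ++ [c]) (some c) rest := by
              simp [splitA_out, List.foldl_cons, hstep]
          _ = splitA_out parts (cur ++ [c] ++ (splitB_consume c rest).1) none
                (splitB_consume c rest).2 := splitA_quoted c rest parts (cur ++ [c])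
          _ = splitB_go (splitB_consume c rest).2
                (cur ++ [c] ++ (splitB_consume c rest).1) parts :=
              ih _ hrest _ _
          _ = splitB_go (c :: rest) cur parts := by
              rw [splitB_go]
              rw [if_pos hq]
      · by_cases hsp : c = ' '
        · subst hsp
          have hrest : rest.length ≤ n := by simp at hl; omega
          rw [splitB_go]
          simp only [if_neg hq]
          rw [if_pos trivial]
          by_cases hcur : cur = []
          · have hstep : splitA_step (parts, ([] : List Char), none) ' ' = (parts, [], none) := by
              simp [splitA_step]
            rw [if_neg (by simp [hcur] : ¬ cur ≠ [])]
            rw [← ih rest hrest [] parts]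
            simp [splitA_out, List.foldl_cons, hstep, hcur]
          · have hstep : splitA_step (parts, cur, none) ' ' = (parts ++ [cur], [], none) := by
              simp [splitA_step, hcur]
            rw [if_pos hcur]
            rw [← ih rest hrest [] (parts ++ [cur])]
            simp [splitA_out, List.foldl_cons, hstep]
        · have hstep : splitA_step (parts, cur, none) c = (parts, cur ++ [c], none) := by
            simp [splitA_step, hq, hsp]
          have hrest : rest.length ≤ n := by simp at hl; omega
          rw [splitB_go]
          simp only [if_neg hq, if_neg hsp]
          rw [← ih rest hrest (cur ++ [c]) parts]
          simp [splitA_out, List.foldl_cons, hstep]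

-- ===== VERDICT (by name: the statement is the Claim_ definition above) =====
theorem split_command_preserving_quotes_py_spec : Claim_equal_split_command_preserving_quotes_py := by
  intro command _
  show split_command_preserving_quotes_py command = split_command_preserving_quotes_py_alt command
  have h := splitA_eq_splitB command.toList.length command.toList le_rfl [] []
  simp only [splitA_out] at h
  simp only [split_command_preserving_quotes_py, split_command_preserving_quotes_py_alt]
  rw [h]
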